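-- pv_equiv track=rewrite | github.com/quasarbright/quasarbright.github.io | python/my_git/diff.py | next_match
-- ===== SOURCE A (Python) =====
-- def next_match(lines1, lines2, start1, start2):
--     '''
--     lines1 and lines2 are [string, ...] no newline
--     start1, start2 are int indices representing the start for each list
--     returns (a index, b index) for next match
--     (-1, -1) if no more matches
--     '''
--     foundMatch = False
--     i1Best = float('inf')
--     i2Best = float('inf')
--     bestDist = float('inf') # (i1best - start1) + (i2best - start2)
--     for i1 in range(start1, len(lines1)):
--         a = lines1[i1]
--         if a in lines2[start2:]:
--             # match
--             foundMatch = True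
--             ain2 = lines2.index(a, start2)
--             dist = (i1 - start1) + (ain2 - start2)
--             if dist < bestDist:
--                 # new best match
--                 i1Best = i1
--                 i2Best = ain2
--                 bestDist = dist
--     for i2 in range(start2, len(lines2)):
--         b = lines2[i2]
--         if b in lines1[start1:]:
--             # match
--             foundMatch = True
--             bin1 = lines1.index(b, start1)
--             dist = (bin1 - start1) + (i2 - start2)
--             if dist < bestDist:
--                 # new best match
--                 i1Best = bin1
--                 i2Best = i2
--                 bestDist = dist
--
--     if foundMatch:
--         return i1Best, i2Best
--     else:
--         return -1, -1
-- ===== SOURCE B (Python) =====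
-- def next_match(lines1, lines2, start1, start2):
--     # Hash the first occurrence of each line of lines2[start2:], then a single
--     # pass over lines1[start1:] finds the minimal-distance pair (first wins).
--     # The symmetric second scan of A is provably redundant.
--     first2 = {}
--     for j in range(start2, len(lines2)):
--         line = lines2[j]
--         if line not in first2:
--             first2[line] = j
--     best = None
--     for i in range(start1, len(lines1)):
--         j = first2.get(lines1[i])
--         if j is not None:
--             d = (i - start1) + (j - start2)
--             if best is None or d < best[0]:
--                 best = (d, i, j)
--     if best is None:
--         return (-1, -1)
--     return (best[1], best[2])
-- ===== Notes on version B (the rewrite author's own statement) =====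
-- stated objective: faster
-- what changed: Replaces A's two quadratic scans (membership test plus list.index inside each loop, and a whole second symmetric loop that can never improve the best) by one dict of first occurrences of lines2[start2:] and a single pass over lines1[start1:].
-- outside the precondition, e.g. on next_match(['b', 'b'], ['a', 'b', 'a'], -1, -1): A returns (1, 1), B returns (-1, 1); on next_match(['a'], ['a'], -3, 0): A raises IndexError, B raises IndexError
import Mathlib
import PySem

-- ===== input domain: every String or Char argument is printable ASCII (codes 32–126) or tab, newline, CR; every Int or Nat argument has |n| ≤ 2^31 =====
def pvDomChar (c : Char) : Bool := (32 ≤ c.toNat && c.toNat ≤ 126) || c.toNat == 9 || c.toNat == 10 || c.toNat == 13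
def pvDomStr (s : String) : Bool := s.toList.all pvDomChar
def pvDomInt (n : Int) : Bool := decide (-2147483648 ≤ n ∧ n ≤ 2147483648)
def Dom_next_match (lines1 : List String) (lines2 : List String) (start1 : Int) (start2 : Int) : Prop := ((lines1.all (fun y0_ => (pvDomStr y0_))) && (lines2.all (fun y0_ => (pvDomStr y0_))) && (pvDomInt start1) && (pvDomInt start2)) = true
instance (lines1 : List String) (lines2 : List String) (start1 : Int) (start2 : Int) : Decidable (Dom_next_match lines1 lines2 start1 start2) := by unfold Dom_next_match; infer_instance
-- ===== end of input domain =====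

-- B replaces A's two quadratic scans by a first-occurrence dict over lines2[start2:] plus one
-- pass over lines1[start1:] (A's second loop is provably redundant); objective: faster.

-- ===== PORT A =====
-- float('inf') sentinels are modeled as `none`: exact, because in A they are only ever compared
-- with ints by strict `<` (an int is always < inf) and i1Best/i2Best are returned only after an
-- update made them ints.  lines2.index(a, start2) is ported as start2 + (position in the slice
-- lines2[start2:]): exact for 0 ≤ start2 (Pre_).
def next_match (lines1 : List String) (lines2 : List String) (start1 : Int) (start2 : Int) : Int × Int :=
  let st1 : Bool × Option Int × Option Int × Option Int :=
    List.foldl (fun st i1 =>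
      let a := PySem.List.pyGetD lines1 i1 ""
      if (PySem.List.slice lines2 (some start2) none).contains a then
        let ain2 : Int := start2 + ((PySem.List.index? (PySem.List.slice lines2 (some start2) none) a).getD 0 : Nat)
        let dist := (i1 - start1) + (ain2 - start2)
        match st.2.2.2 with
        | none => (true, some i1, some ain2, some dist)
        | some bd => if dist < bd then (true, some i1, some ain2, some dist)
                     else (true, st.2.1, st.2.2.1, st.2.2.2)
      else st)
      (false, none, none, none) (PySem.List.pyRange start1 (lines1.length : Int) 1)
  let st2 : Bool × Option Int × Option Int × Option Int :=
    List.foldl (fun st i2 =>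
      let b := PySem.List.pyGetD lines2 i2 ""
      if (PySem.List.slice lines1 (some start1) none).contains b then
        let bin1 : Int := start1 + ((PySem.List.index? (PySem.List.slice lines1 (some start1) none) b).getD 0 : Nat)
        let dist := (bin1 - start1) + (i2 - start2)
        match st.2.2.2 with
        | none => (true, some bin1, some i2, some dist)
        | some bd => if dist < bd then (true, some bin1, some i2, some dist)
                     else (true, st.2.1, st.2.2.1, st.2.2.2)
      else st)
      st1 (PySem.List.pyRange start2 (lines2.length : Int) 1)
  if st2.1 then ((st2.2.1).getD (-1), (st2.2.2.1).getD (-1)) else (-1, -1)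

-- ===== PORT B =====
def next_match_alt (lines1 : List String) (lines2 : List String) (start1 : Int) (start2 : Int) : Int × Int :=
  let first2 : PySem.Dict String Int :=
    List.foldl (fun d j =>
      let line := PySem.List.pyGetD lines2 j ""
      if d.contains line then d else d.insert line j)
      PySem.Dict.empty (PySem.List.pyRange start2 (lines2.length : Int) 1)
  let best : Option (Int × Int × Int) :=
    List.foldl (fun best i =>
      match first2.get? (PySem.List.pyGetD lines1 i "") with
      | none => best
      | some j =>
        match best with
        | none => some ((i - start1) + (j - start2), i, j)
        | some b => if (i - start1) + (j - start2) < b.1 then some ((i - start1) + (j - start2), i, j)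
                    else best)
      none (PySem.List.pyRange start1 (lines1.length : Int) 1)
  match best with
  | none => (-1, -1)
  | some b => (b.2.1, b.2.2)

-- ===== PRECONDITION & SPEC =====
-- Pre_ restricts to the function's natural domain of non-negative start indices ("start1, start2
-- are int indices representing the start for each list"): for negative starts Python's
-- negative-index wraparound in range/slicing/index makes A raise IndexError or return accidental
-- wrapped matches that are artefacts of A's implementation.
def Pre_next_match (lines1 : List String) (lines2 : List String) (start1 : Int) (start2 : Int) : Prop :=
  0 ≤ start1 ∧ 0 ≤ start2
instance (lines1 : List String) (lines2 : List String) (start1 : Int) (start2 : Int) : Decidable (Pre_next_match lines1 lines2 start1 start2) := by unfold Pre_next_match; infer_instance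

def pvWitness_next_match : List String × List String × Int × Int := (["a", "b"], ["b", "c"], 0, 0)

def Spec_next_match (lines1 : List String) (lines2 : List String) (start1 : Int) (start2 : Int) (out : Int × Int) : Prop := out = next_match_alt lines1 lines2 start1 start2
instance (lines1 : List String) (lines2 : List String) (start1 : Int) (start2 : Int) (out : Int × Int) : Decidable (Spec_next_match lines1 lines2 start1 start2 out) := by unfold Spec_next_match; infer_instance

-- ===== CLAIM (what is proved, stated in full; the proofs are below) =====
def Claim_equal_next_match : Prop := ∀ (lines1 : List String) (lines2 : List String) (start1 : Int) (start2 : Int), Dom_next_match lines1 lines2 start1 start2 → Pre_next_match lines1 lines2 start1 start2 → Spec_next_match lines1 lines2 start1 start2 (next_match lines1 lines2 start1 start2)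

-- ===== LEMMAS AND PROOFS =====

-- first index (absolute) of a in l2[s2:], as an Option Int
def pvG (l2 : List String) (s2 : Int) (a : String) : Option Int :=
  (PySem.List.index? (l2.drop s2.toNat) a).map (fun k => s2 + (k : Int))

-- the common "keep the first strict minimum" step, abstracted over the match function g
def pvStep (s1 s2 : Int) (g : Int → Option Int) (best : Option (Int × Int × Int)) (i : Int) :
    Option (Int × Int × Int) :=
  match g i with
  | none => best
  | some j =>
    match best with
    | none => some ((i - s1) + (j - s2), i, j)
    | some b => if (i - s1) + (j - s2) < b.1 then some ((i - s1) + (j - s2), i, j) else best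

def pvRepr (b : Option (Int × Int × Int)) : Bool × Option Int × Option Int × Option Int :=
  match b with
  | none => (false, none, none, none)
  | some (d, i, j) => (true, some i, some j, some d)

-- the dict built by insert-if-absent over a list of indices: lookup is the first matching index
theorem pv_dict_fold_get? (f : Int → String) (idxs : List Int) (d : PySem.Dict String Int) (a : String) :
    (List.foldl (fun d j => if d.contains (f j) then d else d.insert (f j) j) d idxs).get? a =
      (match d.get? a with
       | some v => some v
       | none => List.find? (fun j => f j == a) idxs) := by
  induction idxs generalizing d with
  | nil => cases h : d.get? a <;> simp [h]
  | cons x rest ih =>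
    simp only [List.foldl_cons, List.find?_cons]
    by_cases hc : d.contains (f x) = true
    · rw [if_pos hc, ih d]
      cases hg : d.get? a with
      | some v => rfl
      | none =>
        have hfa : f x ≠ a := by
          intro he
          rw [he] at hc
          rw [(PySem.Dict.get?_eq_none_iff_contains d a).mp hg] at hc
          cases hc
        have : (f x == a) = false := by simp [hfa]
        rw [this]
    · have hc' : d.contains (f x) = false := by
        cases hcb : d.contains (f x) with
        | false => rfl
        | true => exact absurd hcb hc
      rw [if_neg hc, ih (d.insert (f x) x)]
      by_cases hfa : f x = a
      · have hg : d.get? a = none :=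
          (PySem.Dict.get?_eq_none_iff_contains d a).mpr (by rw [← hfa]; exact hc')
        rw [hg]
        have hins : (d.insert (f x) x).get? a = some x := by
          rw [hfa, PySem.Dict.get?_insert_self]
        rw [hins]
        have : (f x == a) = true := by simp [hfa]
        rw [this]
      · rw [PySem.Dict.get?_insert_of_ne d x (fun he => hfa he.symm)]
        cases hg : d.get? a with
        | some v => rfl
        | none =>
          have : (f x == a) = false := by simp [hfa]
          rw [this]

-- find? over range(s, len l2) of "l2[j] == a" is the first occurrence in l2.drop s
theorem pv_find?_pyRange (l2 : List String) (a : String) :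
    ∀ (t : List String) (s : Int), 0 ≤ s → l2.drop s.toNat = t →
      List.find? (fun j => PySem.List.pyGetD l2 j "" == a) (PySem.List.pyRange s (l2.length : Int) 1) =
        (PySem.List.index? t a).map (fun k => s + (k : Int)) := by
  intro t
  induction t with
  | nil =>
    intro s hs ht
    have hlen : l2.length ≤ s.toNat := by
      by_contra h
      have := List.drop_eq_nil_iff.mp ht
      omega
    rw [PySem.List.pyRange_one_eq_nil (by omega : (l2.length : Int) ≤ s)]
    simp [PySem.List.index?]
  | cons x t' ih =>
    intro s hs ht
    have hlt : s.toNat < l2.length := by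
      by_contra h
      rw [List.drop_eq_nil_iff.mpr (by omega)] at ht; cases ht
    have hslt : s < (l2.length : Int) := by omega
    rw [PySem.List.pyRange_one_cons hslt, List.find?_cons]
    have hx : PySem.List.pyGetD l2 s "" = x := by
      have h1 : s = ((s.toNat : Nat) : Int) := by omega
      rw [h1, PySem.List.pyGetD_natCast]
      have h2 : l2[s.toNat] = x := by
        have h0 : (l2.drop s.toNat)[0]'(by rw [ht]; simp) = x := by simp [ht]
        rw [List.getElem_drop] at h0
        simpa using h0
      rw [List.getD_eq_getElem?_getD, List.getElem?_eq_getElem hlt, h2]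
      rfl
    have ht' : l2.drop (s + 1).toNat = t' := by
      have : (s + 1).toNat = s.toNat + 1 := by omega
      rw [this, ← List.drop_drop, ht]
      simp
    by_cases hxa : x = a
    · subst hxa
      rw [hx, PySem.List.index?_cons_self]
      simp
    · rw [hx]
      have hbeq : (x == a) = false := by simp [hxa]
      rw [hbeq]
      show List.find? _ _ = _
      rw [ih (s + 1) (by omega) ht',
        PySem.List.index?_cons_of_ne _ (fun h => hxa h)]
      cases PySem.List.index? t' a <;> simp <;> try omega

-- B's dict lookup is pvG
theorem pv_first2_get? (l2 : List String) (s2 : Int) (hs2 : 0 ≤ s2) (a : String) :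
    (List.foldl (fun d j =>
        let line := PySem.List.pyGetD l2 j ""
        if d.contains line then d else d.insert line j)
      PySem.Dict.empty (PySem.List.pyRange s2 (l2.length : Int) 1)).get? a = pvG l2 s2 a := by
  show (List.foldl (fun d j => if d.contains (PySem.List.pyGetD l2 j "") then d
        else d.insert (PySem.List.pyGetD l2 j "") j) PySem.Dict.empty _).get? a = _
  rw [pv_dict_fold_get? (fun j => PySem.List.pyGetD l2 j "")]
  simp only [PySem.Dict.get?_empty]
  exact pv_find?_pyRange l2 a (l2.drop s2.toNat) s2 hs2 rfl

-- if the fold found nothing, no index in the list matches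
theorem pv_step_found (s1 s2 : Int) (g : Int → Option Int) :
    ∀ (L : List Int), List.foldl (pvStep s1 s2 g) none L = none → ∀ i ∈ L, g i = none := by
  intro L
  induction L using List.reverseRecOn with
  | nil => intro _ i hi; cases hi
  | append_singleton L x ih =>
    intro h i hi
    rw [List.foldl_append, List.foldl_cons, List.foldl_nil] at h
    cases hr : List.foldl (pvStep s1 s2 g) none L with
    | some b =>
      exfalso
      rw [hr] at h
      cases hgx : g x <;> simp only [pvStep, hgx] at h
      · cases h
      · split at h <;> cases h
    | none =>
      rw [hr] at h
      cases hgx : g x with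
      | some jx => simp only [pvStep, hgx] at h; cases h
      | none =>
        rcases List.mem_append.mp hi with hm | hm
        · exact ih hr i hm
        · simp at hm; subst hm; exact hgx

-- the fold's best distance is minimal over all matches in the list
theorem pv_step_min (s1 s2 : Int) (g : Int → Option Int) :
    ∀ (L : List Int) (d i j : Int), List.foldl (pvStep s1 s2 g) none L = some (d, i, j) →
      ∀ i' ∈ L, ∀ j', g i' = some j' → d ≤ (i' - s1) + (j' - s2) := by
  intro L
  induction L using List.reverseRecOn with
  | nil => intro d i j h; simp at h
  | append_singleton L x ih =>
    intro d i j h i' hi' j' hj'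
    rw [List.foldl_append, List.foldl_cons, List.foldl_nil] at h
    cases hr : List.foldl (pvStep s1 s2 g) none L with
    | none =>
      rw [hr] at h
      cases hgx : g x with
      | none => simp only [pvStep, hgx] at h; cases h
      | some jx =>
        simp only [pvStep, hgx, Option.some.injEq, Prod.mk.injEq] at h
        obtain ⟨hd, hx', hjj⟩ := h
        rcases List.mem_append.mp hi' with hm | hm
        · have := pv_step_found s1 s2 g L hr i' hm
          rw [this] at hj'; cases hj'
        · simp at hm; subst hm
          rw [hgx] at hj'
          injection hj' with e
          omega
    | some b =>
      obtain ⟨db, ib, jb⟩ := b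
      rw [hr] at h
      cases hgx : g x with
      | none =>
        simp only [pvStep, hgx, Option.some.injEq, Prod.mk.injEq] at h
        obtain ⟨hd, hx', hjj⟩ := h
        rcases List.mem_append.mp hi' with hm | hm
        · have := ih db ib jb hr i' hm j' hj'
          omega
        · simp at hm; subst hm; rw [hgx] at hj'; cases hj'
      | some jx =>
        simp only [pvStep, hgx] at h
        by_cases hlt : (x - s1) + (jx - s2) < db
        · rw [if_pos hlt] at h
          simp only [Option.some.injEq, Prod.mk.injEq] at h
          obtain ⟨hd, hx', hjj⟩ := h
          rcases List.mem_append.mp hi' with hm | hm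
          · have := ih db ib jb hr i' hm j' hj'
            omega
          · simp at hm; subst hm
            rw [hgx] at hj'
            injection hj' with e
            omega
        · rw [if_neg hlt] at h
          simp only [Option.some.injEq, Prod.mk.injEq] at h
          obtain ⟨hd, hx', hjj⟩ := h
          rcases List.mem_append.mp hi' with hm | hm
          · have := ih db ib jb hr i' hm j' hj'
            omega
          · simp at hm; subst hm
            rw [hgx] at hj'
            injection hj' with e
            omega

-- a fold whose step fixes its initial state returns it unchanged
theorem pv_foldl_fixed {α β : Type} (f : β → α → β) (c : β) :
    ∀ L : List α, (∀ x ∈ L, f c x = c) → List.foldl f c L = c := by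
  intro L
  induction L with
  | nil => intro _; rfl
  | cons x rest ih =>
    intro h
    rw [List.foldl_cons, h x (by simp), ih (fun y hy => h y (by simp [hy]))]

-- A's first loop is pvRepr of the abstract fold
theorem pv_loop1_eq (lines1 lines2 : List String) (start1 start2 : Int) (hs2 : 0 ≤ start2) :
    List.foldl (fun st i1 =>
      let a := PySem.List.pyGetD lines1 i1 ""
      if (PySem.List.slice lines2 (some start2) none).contains a then
        let ain2 : Int := start2 + ((PySem.List.index? (PySem.List.slice lines2 (some start2) none) a).getD 0 : Nat)
        let dist := (i1 - start1) + (ain2 - start2)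
        match st.2.2.2 with
        | none => (true, some i1, some ain2, some dist)
        | some bd => if dist < bd then (true, some i1, some ain2, some dist)
                     else (true, st.2.1, st.2.2.1, st.2.2.2)
      else st)
      (false, none, none, none) (PySem.List.pyRange start1 (lines1.length : Int) 1) =
    pvRepr (List.foldl (pvStep start1 start2 (fun i => pvG lines2 start2 (PySem.List.pyGetD lines1 i "")))
      none (PySem.List.pyRange start1 (lines1.length : Int) 1)) := by
  have h0 : ((false, none, none, none) : Bool × Option Int × Option Int × Option Int) = pvRepr none := rfl
  rw [h0, List.foldl_hom pvRepr]
  intro b i1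
  rw [PySem.List.slice_from lines2 hs2]
  cases hidx : PySem.List.index? (lines2.drop start2.toNat) (PySem.List.pyGetD lines1 i1 "") with
  | none =>
    have hnm : (PySem.List.pyGetD lines1 i1 "") ∉ lines2.drop start2.toNat :=
      (PySem.List.index?_eq_none_iff _ _).mp hidx
    rw [PySem.List.index?_eq_idxOf?] at hidx
    simp [hnm, pvStep, pvG, hidx]
  | some k =>
    have hmem : (PySem.List.pyGetD lines1 i1 "") ∈ lines2.drop start2.toNat :=
      (PySem.List.index?_isSome_iff (lines2.drop start2.toNat) _).mp (by rw [hidx]; rfl)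
    rw [PySem.List.index?_eq_idxOf?] at hidx
    cases b with
    | none => simp [hmem, pvStep, pvG, hidx, pvRepr]
    | some bb =>
      obtain ⟨d0, i0, j0⟩ := bb
      simp [pvStep, pvG, pvRepr, hmem, hidx]
      split_ifs <;> rfl

-- key fact: A's second loop never changes the state produced by the first loop
theorem pv_loop2_id (lines1 lines2 : List String) (start1 start2 : Int)
    (hs1 : 0 ≤ start1) (hs2 : 0 ≤ start2)
    (r : Option (Int × Int × Int))
    (hr : List.foldl (pvStep start1 start2 (fun i => pvG lines2 start2 (PySem.List.pyGetD lines1 i "")))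
      none (PySem.List.pyRange start1 (lines1.length : Int) 1) = r)
    (i2 : Int) (hmem : i2 ∈ PySem.List.pyRange start2 (lines2.length : Int) 1) :
    (let b := PySem.List.pyGetD lines2 i2 ""
     if (PySem.List.slice lines1 (some start1) none).contains b then
       let bin1 : Int := start1 + ((PySem.List.index? (PySem.List.slice lines1 (some start1) none) b).getD 0 : Nat)
       let dist := (bin1 - start1) + (i2 - start2)
       match (pvRepr r).2.2.2 with
       | none => (true, some bin1, some i2, some dist)
       | some bd => if dist < bd then (true, some bin1, some i2, some dist)
                    else (true, (pvRepr r).2.1, (pvRepr r).2.2.1, (pvRepr r).2.2.2)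
     else pvRepr r) = pvRepr r := by
  obtain ⟨hle, hlti⟩ := PySem.List.mem_pyRange_one.mp hmem
  show (if (PySem.List.slice lines1 (some start1) none).contains (PySem.List.pyGetD lines2 i2 "") then _ else pvRepr r) = pvRepr r
  rw [PySem.List.slice_from lines1 hs1]
  cases hc : (lines1.drop start1.toNat).contains (PySem.List.pyGetD lines2 i2 "") with
  | false => simp
  | true =>
    have hmem1 : (PySem.List.pyGetD lines2 i2 "") ∈ lines1.drop start1.toNat := List.contains_iff_mem.mp hc
    have hsome : (PySem.List.index? (lines1.drop start1.toNat) (PySem.List.pyGetD lines2 i2 "")).isSome = true :=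
      (PySem.List.index?_isSome_iff _ _).mpr hmem1
    obtain ⟨k, hk⟩ := Option.isSome_iff_exists.mp hsome
    obtain ⟨hklt, hkb, hkmin⟩ := PySem.List.getElem_of_index?_eq_some hk
    have hi2nn : 0 ≤ i2 := by omega
    have hi2lt : i2.toNat < lines2.length := by omega
    have hbval : lines2[i2.toNat] = PySem.List.pyGetD lines2 i2 "" := by
      have h1 : i2 = ((i2.toNat : Nat) : Int) := by omega
      conv_rhs => rw [h1]
      rw [PySem.List.pyGetD_natCast, List.getD_eq_getElem?_getD, List.getElem?_eq_getElem hi2lt]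
      rfl
    have hrel : i2.toNat - start2.toNat < (lines2.drop start2.toNat).length := by
      simp only [List.length_drop]; omega
    have hbdrop : (lines2.drop start2.toNat)[i2.toNat - start2.toNat]'hrel = PySem.List.pyGetD lines2 i2 "" := by
      rw [List.getElem_drop]
      have he : start2.toNat + (i2.toNat - start2.toNat) = i2.toNat := by omega
      simp_rw [he]
      exact hbval
    have hmem2 : (PySem.List.pyGetD lines2 i2 "") ∈ lines2.drop start2.toNat := by
      rw [← hbdrop]; exact List.getElem_mem _
    have hsome2 : (PySem.List.index? (lines2.drop start2.toNat) (PySem.List.pyGetD lines2 i2 "")).isSome = true :=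
      (PySem.List.index?_isSome_iff _ _).mpr hmem2
    obtain ⟨k2, hk2⟩ := Option.isSome_iff_exists.mp hsome2
    obtain ⟨hk2lt, hk2b, hk2min⟩ := PySem.List.getElem_of_index?_eq_some hk2
    have hdroplen : k < lines1.length - start1.toNat := by
      have := hklt; simp only [List.length_drop] at this; omega
    have hiabmem : (start1 + (k : Int)) ∈ PySem.List.pyRange start1 (lines1.length : Int) 1 := by
      rw [PySem.List.mem_pyRange_one]
      omega
    have hgab : pvG lines2 start2 (PySem.List.pyGetD lines1 (start1 + (k : Int)) "") = some (start2 + (k2 : Int)) := by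
      have hget : PySem.List.pyGetD lines1 (start1 + (k : Int)) "" = PySem.List.pyGetD lines2 i2 "" := by
        have h1 : start1 + (k : Int) = (((start1.toNat + k) : Nat) : Int) := by omega
        rw [h1, PySem.List.pyGetD_natCast]
        have hlt1 : start1.toNat + k < lines1.length := by omega
        rw [List.getD_eq_getElem?_getD, List.getElem?_eq_getElem hlt1]
        have h2 := hkb
        rw [List.getElem_drop] at h2
        simpa using h2
      rw [hget]
      have hk2' := hk2
      rw [PySem.List.index?_eq_idxOf?] at hk2'
      simp [pvG, hk2']
    cases r with
    | none =>
      exfalso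
      have := pv_step_found start1 start2 _ _ hr _ hiabmem
      rw [this] at hgab
      cases hgab
    | some rr =>
      obtain ⟨d0, i0, j0⟩ := rr
      have hmin := pv_step_min start1 start2 _ _ d0 i0 j0 hr (start1 + (k : Int)) hiabmem
        (start2 + (k2 : Int)) hgab
      have hk2le : (k2 : Int) ≤ i2 - start2 := by
        have hnlt : ¬ (i2.toNat - start2.toNat < k2) := fun hlt => hk2min _ hlt hbdrop
        omega
      simp only [if_true, pvRepr, hk, Option.getD_some]
      rw [if_neg (by omega)]

-- B's main fold is the abstract fold
theorem pv_bfold_eq (lines1 lines2 : List String) (start1 start2 : Int) (hs2 : 0 ≤ start2) :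
    List.foldl (fun best i =>
      match (List.foldl (fun d j =>
          let line := PySem.List.pyGetD lines2 j ""
          if d.contains line then d else d.insert line j)
        PySem.Dict.empty (PySem.List.pyRange start2 (lines2.length : Int) 1)).get?
          (PySem.List.pyGetD lines1 i "") with
      | none => best
      | some j =>
        match best with
        | none => some ((i - start1) + (j - start2), i, j)
        | some b => if (i - start1) + (j - start2) < b.1 then some ((i - start1) + (j - start2), i, j)
                    else best)
      none (PySem.List.pyRange start1 (lines1.length : Int) 1) =
    List.foldl (pvStep start1 start2 (fun i => pvG lines2 start2 (PySem.List.pyGetD lines1 i "")))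
      none (PySem.List.pyRange start1 (lines1.length : Int) 1) := by
  apply PySem.List.foldl_congr_mem
  intro acc x _
  rw [pv_first2_get? lines2 start2 hs2]
  rfl

-- ===== VERDICT (by name: the statement is the Claim_ definition above) =====
theorem next_match_spec : Claim_equal_next_match := by
  intro lines1 lines2 start1 start2 _ hpre
  obtain ⟨hs1, hs2⟩ := hpre
  unfold Spec_next_match
  have hA : next_match lines1 lines2 start1 start2 =
      (match List.foldl (pvStep start1 start2 (fun i => pvG lines2 start2 (PySem.List.pyGetD lines1 i "")))
          none (PySem.List.pyRange start1 (lines1.length : Int) 1) with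
       | none => ((-1 : Int), (-1 : Int))
       | some b => (b.2.1, b.2.2)) := by
    show (let st2 : Bool × Option Int × Option Int × Option Int :=
            List.foldl (fun st i2 =>
              let b := PySem.List.pyGetD lines2 i2 ""
              if (PySem.List.slice lines1 (some start1) none).contains b then
                let bin1 : Int := start1 + ((PySem.List.index? (PySem.List.slice lines1 (some start1) none) b).getD 0 : Nat)
                let dist := (bin1 - start1) + (i2 - start2)
                match st.2.2.2 with
                | none => (true, some bin1, some i2, some dist)
                | some bd => if dist < bd then (true, some bin1, some i2, some dist)
                             else (true, st.2.1, st.2.2.1, st.2.2.2)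
              else st)
              (List.foldl (fun st i1 =>
                let a := PySem.List.pyGetD lines1 i1 ""
                if (PySem.List.slice lines2 (some start2) none).contains a then
                  let ain2 : Int := start2 + ((PySem.List.index? (PySem.List.slice lines2 (some start2) none) a).getD 0 : Nat)
                  let dist := (i1 - start1) + (ain2 - start2)
                  match st.2.2.2 with
                  | none => (true, some i1, some ain2, some dist)
                  | some bd => if dist < bd then (true, some i1, some ain2, some dist)
                               else (true, st.2.1, st.2.2.1, st.2.2.2)
                else st)
                (false, none, none, none) (PySem.List.pyRange start1 (lines1.length : Int) 1))
              (PySem.List.pyRange start2 (lines2.length : Int) 1)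
          if st2.1 then ((st2.2.1).getD (-1), (st2.2.2.1).getD (-1)) else (-1, -1)) = _
    rw [pv_loop1_eq lines1 lines2 start1 start2 hs2]
    rw [pv_foldl_fixed _ _ _
      (fun x hx => pv_loop2_id lines1 lines2 start1 start2 hs1 hs2 _ rfl x hx)]
    cases List.foldl (pvStep start1 start2 (fun i => pvG lines2 start2 (PySem.List.pyGetD lines1 i "")))
        none (PySem.List.pyRange start1 (lines1.length : Int) 1) with
    | none => rfl
    | some rr => obtain ⟨d, i, j⟩ := rr; rfl
  have hB : next_match_alt lines1 lines2 start1 start2 =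
      (match List.foldl (pvStep start1 start2 (fun i => pvG lines2 start2 (PySem.List.pyGetD lines1 i "")))
          none (PySem.List.pyRange start1 (lines1.length : Int) 1) with
       | none => ((-1 : Int), (-1 : Int))
       | some b => (b.2.1, b.2.2)) := by
    show (match List.foldl (fun best i =>
        match (List.foldl (fun d j =>
            let line := PySem.List.pyGetD lines2 j ""
            if d.contains line then d else d.insert line j)
          PySem.Dict.empty (PySem.List.pyRange start2 (lines2.length : Int) 1)).get?
            (PySem.List.pyGetD lines1 i "") with
        | none => best
        | some j =>
          match best with
          | none => some ((i - start1) + (j - start2), i, j)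
          | some b => if (i - start1) + (j - start2) < b.1 then some ((i - start1) + (j - start2), i, j)
                      else best)
        none (PySem.List.pyRange start1 (lines1.length : Int) 1) with
      | none => ((-1 : Int), (-1 : Int))
      | some b => (b.2.1, b.2.2)) = _
    rw [pv_bfold_eq lines1 lines2 start1 start2 hs2]
  rw [hA, hB]
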